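-- pv_equiv track=rewrite | github.com/bioShaun/SNP_Primer_Pipeline3 | src/snp_primer_pipeline/core/alignment.py | _find_longest_substring
-- ===== SOURCE A (Python) =====
-- def _tm_simple(seq: str) -> int:
--     """Simple Tm calculator (V2 style)."""
--     t = 0
--     for a in seq.upper():
--         if a in 'AT':
--             t += 2
--         if a in 'CG':
--             t += 4
--     return t
--
-- def _find_longest_substring(s1: str, s2: str) -> tuple:
--     """
--     Find the segment with largest Tm (V2 style).
--     Returns: (longestStart, longestEnd, nL, nR)
--     """
--     longest_start = 0
--     longest_end = 0
--     largest_tm = 0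
--     start = 0
--
--     gaps = [i for i, c in enumerate(s1) if c == '-' or s2[i] == '-']
--     gaps.append(len(s1))
--
--     for gap in gaps:
--         end = gap
--         tm = _tm_simple(s1[start:end])
--         if tm > largest_tm:
--             longest_start = start
--             longest_end = end
--             largest_tm = tm
--         start = gap + 1
--
--     n_left = len(s1[:longest_start].replace("-", ""))
--     n_right = len(s1[longest_end:].replace("-", ""))
--     return longest_start, longest_end, n_left, n_right
-- ===== SOURCE B (Python) =====
-- def _find_longest_substring(s1: str, s2: str) -> tuple:
--     """Single fused scan: keep a running Tm for the current gap-free segment."""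
--     best_start = 0
--     best_end = 0
--     best_tm = 0
--     start = 0
--     acc = 0
--     for i, c in enumerate(s1):
--         if c == '-' or s2[i] == '-':
--             if acc > best_tm:
--                 best_start, best_end, best_tm = start, i, acc
--             start = i + 1
--             acc = 0
--         else:
--             u = c.upper()
--             if u in 'AT':
--                 acc += 2
--             if u in 'CG':
--                 acc += 4
--     if acc > best_tm:
--         best_start, best_end, best_tm = start, len(s1), acc
--     n_left = len(s1[:best_start].replace("-", ""))
--     n_right = len(s1[best_end:].replace("-", ""))
--     return best_start, best_end, n_left, n_right
-- ===== Notes on version B (the rewrite author's own statement) =====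
-- stated objective: simpler
-- what changed: Instead of building a list of gap indices and then re-slicing and re-scoring each segment with _tm_simple, B does one fused left-to-right scan over enumerate(s1) that keeps a running Tm accumulator for the current gap-free segment and closes it at each gap and at the end.
import Mathlib
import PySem

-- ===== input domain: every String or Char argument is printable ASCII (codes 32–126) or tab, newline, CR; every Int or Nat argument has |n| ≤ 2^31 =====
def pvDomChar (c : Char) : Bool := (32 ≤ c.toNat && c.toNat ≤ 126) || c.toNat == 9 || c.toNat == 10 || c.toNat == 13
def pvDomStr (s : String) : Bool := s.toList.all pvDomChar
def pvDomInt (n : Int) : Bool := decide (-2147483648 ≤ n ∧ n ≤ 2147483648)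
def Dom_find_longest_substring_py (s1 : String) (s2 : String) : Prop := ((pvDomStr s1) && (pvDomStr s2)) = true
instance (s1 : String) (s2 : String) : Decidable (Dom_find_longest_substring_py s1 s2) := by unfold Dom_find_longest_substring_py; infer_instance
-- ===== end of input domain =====

-- B replaces A's "collect gap indices, then slice and re-score each segment" with a
-- single fused scan keeping a running Tm accumulator for the current segment (simpler, one pass).

-- ===== PORT A =====
-- the gap test `c == '-' or s2[i] == '-'` (identical expression in both Pythons)
def pvGap (s2 : String) (i : Int) (c : Char) : Bool :=
  c == '-' || PySem.Str.pyGet? s2 i == some '-'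

-- _tm_simple
def pvTmSimple (seq : List Char) : Int :=
  (PySem.Chars.upper seq).foldl (fun t a =>
    let t := if a == 'A' || a == 'T' then t + 2 else t
    if a == 'C' || a == 'G' then t + 4 else t) 0

-- the body of A's `for gap in gaps` loop
def pvStepA (cs : List Char) (st : Int × Int × Int × Int) (gap : Int) : Int × Int × Int × Int :=
  let tm := pvTmSimple (PySem.List.slice cs (some st.2.2.2) (some gap))
  if tm > st.2.2.1 then (st.2.2.2, gap, tm, gap + 1) else (st.1, st.2.1, st.2.2.1, gap + 1)

def find_longest_substring_py (s1 : String) (s2 : String) : Int × Int × Int × Int :=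
  let cs := s1.toList
  let gaps : List Int :=
    ((PySem.List.enumerate cs 0).filter (fun p => pvGap s2 p.1 p.2)).map (fun p => p.1)
  let gaps := gaps ++ [(cs.length : Int)]
  let st := gaps.foldl (pvStepA cs) (0, 0, 0, 0)
  let nL : Int := (PySem.Chars.replace (PySem.List.slice cs none (some st.1)) ['-'] []).length
  let nR : Int := (PySem.Chars.replace (PySem.List.slice cs (some st.2.1) none) ['-'] []).length
  (st.1, st.2.1, nL, nR)

-- ===== PORT B =====
-- the body of B's `for i, c in enumerate(s1)` loop; state (best_start, best_end, best_tm, start, acc)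
def pvStepB (s2 : String) (st : Int × Int × Int × Int × Int) (ic : Int × Char) : Int × Int × Int × Int × Int :=
  if pvGap s2 ic.1 ic.2 then
    if st.2.2.2.2 > st.2.2.1 then (st.2.2.2.1, ic.1, st.2.2.2.2, ic.1 + 1, 0)
    else (st.1, st.2.1, st.2.2.1, ic.1 + 1, 0)
  else
    let u := PySem.Chars.upperChar ic.2
    let acc := if u == 'A' || u == 'T' then st.2.2.2.2 + 2 else st.2.2.2.2
    let acc := if u == 'C' || u == 'G' then acc + 4 else acc
    (st.1, st.2.1, st.2.2.1, st.2.2.2.1, acc)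

def find_longest_substring_py_alt (s1 : String) (s2 : String) : Int × Int × Int × Int :=
  let cs := s1.toList
  let st := (PySem.List.enumerate cs 0).foldl (pvStepB s2) (0, 0, 0, 0, 0)
  let fin : Int × Int × Int :=
    if st.2.2.2.2 > st.2.2.1 then (st.2.2.2.1, (cs.length : Int), st.2.2.2.2)
    else (st.1, st.2.1, st.2.2.1)
  let nL : Int := (PySem.Chars.replace (PySem.List.slice cs none (some fin.1)) ['-'] []).length
  let nR : Int := (PySem.Chars.replace (PySem.List.slice cs (some fin.2.1) none) ['-'] []).length
  (fin.1, fin.2.1, nL, nR)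

-- ===== PRECONDITION & SPEC =====
-- A raises IndexError iff some i < len(s1) has s1[i] != '-' and i >= len(s2); Pre_ excludes exactly those inputs.
def Pre_find_longest_substring_py (s1 : String) (s2 : String) : Prop :=
  ∀ i : Fin s1.toList.length, s1.toList[i] = '-' ∨ (i : Nat) < s2.toList.length
instance (s1 : String) (s2 : String) : Decidable (Pre_find_longest_substring_py s1 s2) := by
  unfold Pre_find_longest_substring_py; infer_instance
def pvWitness_find_longest_substring_py : String × String := ("AT-G", "ATAG")

def Spec_find_longest_substring_py (s1 : String) (s2 : String) (out : Int × Int × Int × Int) : Prop := out = find_longest_substring_py_alt s1 s2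
instance (s1 : String) (s2 : String) (out : Int × Int × Int × Int) : Decidable (Spec_find_longest_substring_py s1 s2 out) := by unfold Spec_find_longest_substring_py; infer_instance

-- ===== CLAIM (what is proved, stated in full; the proofs are below) =====
def Claim_equal_find_longest_substring_py : Prop := ∀ (s1 : String) (s2 : String), Dom_find_longest_substring_py s1 s2 → Pre_find_longest_substring_py s1 s2 → Spec_find_longest_substring_py s1 s2 (find_longest_substring_py s1 s2)

-- ===== LEMMAS AND PROOFS =====

-- index-level gap predicate used by the proofs
def pvG (cs ds : List Char) (k : Nat) : Bool :=
  (cs[k]? == some '-') || (ds[k]? == some '-')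

theorem pvTm_append_singleton (xs : List Char) (c : Char) :
    pvTmSimple (xs ++ [c]) =
      (let u := PySem.Chars.upperChar c
       let t := if u == 'A' || u == 'T' then pvTmSimple xs + 2 else pvTmSimple xs
       if u == 'C' || u == 'G' then t + 4 else t) := by
  simp [pvTmSimple, PySem.Chars.upper, List.foldl_append]

theorem pvGaps_eq (s2 : String) (cs : List Char) : ∀ (tail : List Char) (k : Nat),
    cs.drop k = tail →
    ((PySem.List.enumerate tail (k : Int)).filter (fun p => pvGap s2 p.1 p.2)).map (fun p => p.1)
      = ((List.range' k tail.length).filter (pvG cs s2.toList)).map (fun j : Nat => (j : Int)) := by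
  intro tail
  induction tail with
  | nil => intro k _; simp [PySem.List.enumerate]
  | cons c rest ih =>
    intro k hk
    have hck : cs[k]? = some c := by
      have h0 := List.getElem?_drop (xs := cs) (i := k) (j := 0)
      rw [hk] at h0; simpa using h0.symm
    have hrest : cs.drop (k + 1) = rest := by
      have h1 : cs.drop (k + 1) = (cs.drop k).drop 1 := by
        rw [List.drop_drop]
      rw [h1, hk]; rfl
    have hg : pvGap s2 (↑k) c = pvG cs s2.toList k := by
      simp [pvGap, pvG, hck]
    have hcast : (k : Int) + 1 = ((k + 1 : Nat) : Int) := by push_cast; ring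
    rw [show PySem.List.enumerate (c :: rest) (k : Int)
          = ((k : Int), c) :: PySem.List.enumerate rest ((k : Int) + 1) from
        PySem.List.enumerate_cons ..]
    rw [show (c :: rest).length = rest.length + 1 from rfl,
        show List.range' k (rest.length + 1) = k :: List.range' (k + 1) rest.length from rfl]
    simp only [List.filter_cons, hcast]
    cases hgB : pvG cs s2.toList k
    · rw [hg, hgB]
      simpa using ih (k + 1) hrest
    · rw [hg, hgB]
      simpa using ih (k + 1) hrest

-- the final close A performs at gap = len(s1), phrased on B's loop state
def pvFin (cs : List Char) (st : Int × Int × Int × Int × Int) : Int × Int × Int × Int :=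
  if st.2.2.2.2 > st.2.2.1 then (st.2.2.2.1, (cs.length : Int), st.2.2.2.2, (cs.length : Int) + 1)
  else (st.1, st.2.1, st.2.2.1, (cs.length : Int) + 1)

theorem pvMain (s2 : String) (cs : List Char) : ∀ (tail : List Char) (k : Nat)
    (ls le ltm : Int) (start : Nat) (acc : Int),
    cs.drop k = tail → start ≤ k →
    acc = pvTmSimple ((cs.drop start).take (k - start)) →
    List.foldl (pvStepA cs) (ls, le, ltm, (start : Int))
      ((((List.range' k tail.length).filter (pvG cs s2.toList)).map (fun j : Nat => (j : Int))) ++ [(cs.length : Int)])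
    = pvFin cs (List.foldl (pvStepB s2) (ls, le, ltm, (start : Int), acc)
        (PySem.List.enumerate tail (k : Int))) := by
  intro tail
  induction tail with
  | nil =>
    intro k ls le ltm start acc hk hsk hacc
    have hnk : cs.length ≤ k := by
      have := congrArg List.length hk; simp at this; omega
    have hdl : (cs.drop start).length = cs.length - start := by simp
    have hsl : PySem.List.slice cs (some (start : Int)) (some (cs.length : Int))
        = (cs.drop start).take (k - start) := by
      rw [PySem.List.slice_natCast]
      rw [List.take_of_length_le (by omega), List.take_of_length_le (by omega)]
    simp [PySem.List.enumerate, pvFin, pvStepA, hsl, ← hacc]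
  | cons c rest ih =>
    intro k ls le ltm start acc hk hsk hacc
    have hkn : k < cs.length := by
      have := congrArg List.length hk; simp at this; omega
    have hck : cs[k]? = some c := by
      have h0 := List.getElem?_drop (xs := cs) (i := k) (j := 0)
      rw [hk] at h0; simpa using h0.symm
    have hrest : cs.drop (k + 1) = rest := by
      have h1 : cs.drop (k + 1) = (cs.drop k).drop 1 := by rw [List.drop_drop]
      rw [h1, hk]; rfl
    have hcast : (k : Int) + 1 = ((k + 1 : Nat) : Int) := by push_cast; ring
    have hg : pvGap s2 (↑k) c = pvG cs s2.toList k := by simp [pvGap, pvG, hck]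
    have hslk : PySem.List.slice cs (some (start : Int)) (some (k : Int))
        = (cs.drop start).take (k - start) := PySem.List.slice_natCast ..
    rw [show (c :: rest).length = rest.length + 1 from rfl,
        show List.range' k (rest.length + 1) = k :: List.range' (k + 1) rest.length from rfl,
        show PySem.List.enumerate (c :: rest) (k : Int)
          = ((k : Int), c) :: PySem.List.enumerate rest ((k : Int) + 1) from
        PySem.List.enumerate_cons ..]
    simp only [List.filter_cons, List.foldl_cons]
    cases hgB : pvG cs s2.toList k with
    | false =>
      have htake : (cs.drop start).take (k + 1 - start)
          = (cs.drop start).take (k - start) ++ [c] := by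
        have h1 : k + 1 - start = (k - start) + 1 := by omega
        have h2 : (cs.drop start)[k - start]? = some c := by
          rw [List.getElem?_drop, show start + (k - start) = k from by omega, hck]
        rw [h1, List.take_add_one, h2]; rfl
      have hstep : pvStepB s2 (ls, le, ltm, (start : Int), acc) ((k : Int), c)
          = (ls, le, ltm, (start : Int),
             pvTmSimple ((cs.drop start).take (k + 1 - start))) := by
        rw [htake, pvTm_append_singleton, ← hacc]
        simp [pvStepB, hg, hgB]
      rw [hstep]
      simp only [Bool.false_eq_true, if_false, hcast]
      exact ih (k + 1) ls le ltm start _ hrest (by omega) rfl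
    | true =>
      have hstepA : pvStepA cs (ls, le, ltm, (start : Int)) (k : Int)
          = if acc > ltm then ((start : Int), (k : Int), acc, (k : Int) + 1)
            else (ls, le, ltm, (k : Int) + 1) := by
        simp [pvStepA, hslk, ← hacc]
      have hstepB : pvStepB s2 (ls, le, ltm, (start : Int), acc) ((k : Int), c)
          = if acc > ltm then ((start : Int), (k : Int), acc, (k : Int) + 1, 0)
            else (ls, le, ltm, (k : Int) + 1, 0) := by
        simp [pvStepB, hg, hgB]
      have hz : (0 : Int) = pvTmSimple ((cs.drop (k + 1)).take ((k + 1) - (k + 1))) := by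
        simp [pvTmSimple, PySem.Chars.upper]
      rw [if_pos (by simp), List.map_cons, List.cons_append, List.foldl_cons, hstepA, hstepB]
      simp only [hcast]
      by_cases hlt : acc > ltm
      · rw [if_pos hlt, if_pos hlt]
        exact ih (k + 1) (start : Int) (k : Int) acc (k + 1) 0 hrest (le_refl _) hz
      · rw [if_neg hlt, if_neg hlt]
        exact ih (k + 1) ls le ltm (k + 1) 0 hrest (by omega) hz

-- ===== VERDICT (by name: the statement is the Claim_ definition above) =====
theorem find_longest_substring_py_spec : Claim_equal_find_longest_substring_py := by
  intro s1 s2 _ _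
  unfold Spec_find_longest_substring_py find_longest_substring_py find_longest_substring_py_alt
  simp only
  have h0 : s1.toList.drop 0 = s1.toList := by simp
  have hgaps := pvGaps_eq s2 s1.toList s1.toList 0 h0
  have hmain := pvMain s2 s1.toList s1.toList 0 0 0 0 0 0 h0 (le_refl 0)
    (by simp [pvTmSimple, PySem.Chars.upper])
  simp only [Nat.cast_zero] at hgaps hmain
  rw [hgaps, hmain]
  by_cases h : (List.foldl (pvStepB s2) (0, 0, 0, 0, 0)
      (PySem.List.enumerate s1.toList 0)).2.2.2.2
      > (List.foldl (pvStepB s2) (0, 0, 0, 0, 0) (PySem.List.enumerate s1.toList 0)).2.2.1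
  · simp [pvFin, h]
  · simp [pvFin, h]
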